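-- pv_equiv track=rewrite | github.com/Kohdz/Algorithms | AmazonOAII/freshPromotion.py | checkWinPrize
-- ===== SOURCE A (Python) =====
-- def checkWinPrize(codeList, shoppingCart):
--     if not codeList:
--         return 1
--     if not shoppingCart:
--         return 0
--
--     codeIndex = 0
--     matchFromIndex = 0
--     while codeIndex < len(codeList) and matchFromIndex + len(codeList[codeIndex]) <= len(shoppingCart):
--         matched = True
--         codes = codeList[codeIndex]
--         for i in range(len(codes)):
--             if codes[i] != 'anything' and codes[i] != shoppingCart[matchFromIndex+i]:
--                 matched = False
--                 break
--         if matched: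
--             matchFromIndex = matchFromIndex + len(codes)
--             codeIndex += 1
--         else:
--             matchFromIndex += 1
--
--     return 1 if codeIndex == len(codeList) else 0
-- ===== SOURCE B (Python) =====
-- def checkWinPrize(codeList, shoppingCart):
--     if not codeList:
--         return 1
--     if not shoppingCart:
--         return 0
--     # Backwards threshold pass: for each block, from last to first, find the
--     # LATEST position where it can sit so that all later blocks still fit after it.
--     limit = len(shoppingCart)  # exclusive upper bound on where the current block may end
--     for codes in reversed(codeList):
--         j = limit - len(codes)
--         while j >= 0 and not all(codes[i] == 'anything' or codes[i] == shoppingCart[j + i]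
--                                  for i in range(len(codes))):
--             j -= 1
--         if j < 0:
--             return 0
--         limit = j
--     return 1
-- ===== Notes on version B (the rewrite author's own statement) =====
-- stated objective: alternative
-- what changed: Replaced A's forward greedy scan (advance through the cart finding each block's earliest match with two mutable indices) by a backward threshold pass: iterate the code blocks in reverse, each time scanning downward for the LATEST position where the block fits before the previously committed threshold; correctness rests on monotonicity of feasibility in the bound, proved via a placement predicate in Lean.
import Mathlib
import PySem

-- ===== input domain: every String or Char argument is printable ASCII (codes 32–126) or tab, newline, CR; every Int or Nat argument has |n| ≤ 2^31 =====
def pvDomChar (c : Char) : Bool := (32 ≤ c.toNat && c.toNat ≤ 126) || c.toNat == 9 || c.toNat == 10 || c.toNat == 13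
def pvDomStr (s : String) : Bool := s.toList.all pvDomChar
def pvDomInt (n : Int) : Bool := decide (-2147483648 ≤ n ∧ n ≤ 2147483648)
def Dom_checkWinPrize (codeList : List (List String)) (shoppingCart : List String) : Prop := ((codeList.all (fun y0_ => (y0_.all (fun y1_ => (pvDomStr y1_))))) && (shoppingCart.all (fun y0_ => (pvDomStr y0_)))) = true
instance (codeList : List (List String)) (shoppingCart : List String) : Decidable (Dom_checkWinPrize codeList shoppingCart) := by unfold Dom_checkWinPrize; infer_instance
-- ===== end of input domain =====

-- B replaces A's forward earliest-match greedy scan by a BACKWARD pass over the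
-- code blocks computing, for each block from last to first, the latest position
-- where it can still sit (a threshold DP); same cost, different algorithm.

-- ===== PORT A =====
-- A's inner `for i in range(len(codes))` with the break flag; the cart access
-- shoppingCart[matchFromIndex+i] is always in range when called from the loop
-- (the loop condition guarantees it), ported with getD.
def innerA (codes shoppingCart : List String) (matchFromIndex i : Nat) : Bool :=
  if h : i < codes.length then
    if codes[i] ≠ "anything" ∧ codes[i] ≠ shoppingCart.getD (matchFromIndex + i) "" then
      false
    else
      innerA codes shoppingCart matchFromIndex (i + 1)
  else
    true
termination_by codes.length - i

theorem innerA_false_lt (codes shoppingCart : List String) (matchFromIndex i : Nat) :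
    innerA codes shoppingCart matchFromIndex i = false → i < codes.length := by
  intro h
  by_contra hc
  rw [innerA, dif_neg hc] at h
  exact absurd h (by simp)

-- A's while loop over (codeIndex, matchFromIndex); the `and` of the while
-- condition is split into two nested ifs so the index proof is in scope.
def loopA (codeList : List (List String)) (shoppingCart : List String)
    (codeIndex matchFromIndex : Nat) : Int :=
  if h : codeIndex < codeList.length then
    if matchFromIndex + (codeList[codeIndex]'h).length ≤ shoppingCart.length then
      if hm : innerA (codeList[codeIndex]'h) shoppingCart matchFromIndex 0 = true then
        loopA codeList shoppingCart (codeIndex + 1)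
          (matchFromIndex + (codeList[codeIndex]'h).length)
      else
        loopA codeList shoppingCart codeIndex (matchFromIndex + 1)
    else
      if codeIndex = codeList.length then 1 else 0
  else
    if codeIndex = codeList.length then 1 else 0
termination_by (codeList.length - codeIndex, shoppingCart.length - matchFromIndex)
decreasing_by
  · exact Prod.Lex.left _ _ (by omega)
  · refine Prod.Lex.right' _ (by omega) ?_
    have := innerA_false_lt _ _ _ _ (by simpa using hm)
    omega

def checkWinPrize (codeList : List (List String)) (shoppingCart : List String) : Int :=
  if codeList = [] then 1
  else if shoppingCart = [] then 0
  else loopA codeList shoppingCart 0 0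

-- ===== PORT B =====
-- all(codes[i] == 'anything' or codes[i] == shoppingCart[j+i] for i in range(len(codes)))
def checkB (codes shoppingCart : List String) (j : Nat) : Bool :=
  (List.range codes.length).all
    (fun i => codes.getD i "" == "anything" || codes.getD i "" == shoppingCart.getD (j + i) "")

-- the `while j >= 0 and not all(...)` downward scan; returns the final j
def downScan (codes shoppingCart : List String) (j : Int) : Int :=
  if h : 0 ≤ j then
    if checkB codes shoppingCart j.toNat then j
    else downScan codes shoppingCart (j - 1)
  else j
termination_by (j + 1).toNat
decreasing_by omega

-- for codes in reversed(codeList): find latest fit below `limit`, else return 0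
def loopB (shoppingCart : List String) : List (List String) → Int → Int
  | [], _ => 1
  | codes :: rest, limit =>
    let j := downScan codes shoppingCart (limit - (codes.length : Int))
    if j < 0 then 0 else loopB shoppingCart rest j

def checkWinPrize_alt (codeList : List (List String)) (shoppingCart : List String) : Int :=
  if codeList = [] then 1
  else if shoppingCart = [] then 0
  else loopB shoppingCart codeList.reverse (shoppingCart.length : Int)

-- ===== PRECONDITION & SPEC =====
def Spec_checkWinPrize (codeList : List (List String)) (shoppingCart : List String) (out : Int) : Prop := out = checkWinPrize_alt codeList shoppingCart
instance (codeList : List (List String)) (shoppingCart : List String) (out : Int) : Decidable (Spec_checkWinPrize codeList shoppingCart out) := by unfold Spec_checkWinPrize; infer_instance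

-- ===== CLAIM (what is proved, stated in full; the proofs are below) =====
def Claim_equal_checkWinPrize : Prop := ∀ (codeList : List (List String)) (shoppingCart : List String), Dom_checkWinPrize codeList shoppingCart → Spec_checkWinPrize codeList shoppingCart (checkWinPrize codeList shoppingCart)

-- ===== LEMMAS AND PROOFS =====

-- the block `codes` matches the cart window starting at j (wildcard-aware)
def matchAt (codes shoppingCart : List String) (j : Nat) : Prop :=
  ∀ i, i < codes.length →
    (codes.getD i "" = "anything" ∨ codes.getD i "" = shoppingCart.getD (j + i) "")

-- the blocks can be placed in order, starts ≥ lo, each block ending ≤ hi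
def Place (shoppingCart : List String) : List (List String) → Nat → Nat → Prop
  | [], _, _ => True
  | c :: rs, lo, hi =>
    ∃ j, lo ≤ j ∧ matchAt c shoppingCart j ∧ j + c.length ≤ hi ∧
      Place shoppingCart rs (j + c.length) hi

theorem place_mono_hi (cart : List String) (bs : List (List String)) (lo hi hi' : Nat)
    (h : Place cart bs lo hi) (hle : hi ≤ hi') : Place cart bs lo hi' := by
  induction bs generalizing lo with
  | nil => trivial
  | cons c rs ih =>
    obtain ⟨j, h1, h2, h3, h4⟩ := h
    exact ⟨j, h1, h2, by omega, ih _ h4⟩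

theorem place_mono_lo (cart : List String) (bs : List (List String)) (lo lo' hi : Nat)
    (h : Place cart bs lo hi) (hle : lo' ≤ lo) : Place cart bs lo' hi := by
  cases bs with
  | nil => trivial
  | cons c rs =>
    obtain ⟨j, h1, h2, h3, h4⟩ := h
    exact ⟨j, by omega, h2, h3, h4⟩

theorem place_snoc (cart : List String) (xs : List (List String)) (c : List String)
    (lo hi : Nat) :
    Place cart (xs ++ [c]) lo hi ↔
      ∃ j, lo ≤ j ∧ matchAt c cart j ∧ j + c.length ≤ hi ∧ Place cart xs lo j := by
  induction xs generalizing lo with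
  | nil =>
    simp [Place]
  | cons x xs' ih =>
    simp only [List.cons_append, Place]
    constructor
    · rintro ⟨j0, h1, h2, h3, hrest⟩
      obtain ⟨j, hj1, hj2, hj3, hj4⟩ := (ih _).mp hrest
      exact ⟨j, by omega, hj2, hj3, j0, h1, h2, by omega, hj4⟩
    · rintro ⟨j, hj1, hj2, hj3, j0, h1, h2, h3, h4⟩
      exact ⟨j0, h1, h2, by omega, (ih _).mpr ⟨j, by omega, hj2, hj3, h4⟩⟩

-- A's inner scan decides matchAt (from index i on)
theorem innerA_iff (codes cart : List String) (m i : Nat) :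
    innerA codes cart m i = true ↔
      ∀ i', i ≤ i' → i' < codes.length →
        (codes.getD i' "" = "anything" ∨ codes.getD i' "" = cart.getD (m + i') "") := by
  by_cases h : i < codes.length
  · rw [innerA, dif_pos h]
    have hgd : codes.getD i "" = codes[i] := by
      simp [List.getD, List.getElem?_eq_getElem h]
    by_cases hc : codes[i] ≠ "anything" ∧ codes[i] ≠ cart.getD (m + i) ""
    · rw [if_pos hc]
      simp only [Bool.false_eq_true, false_iff]
      intro hall
      have := hall i (le_refl i) h
      rw [hgd] at this
      tauto
    · rw [if_neg hc]
      rw [innerA_iff codes cart m (i + 1)]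
      constructor
      · intro hall i' hle hlt
        rcases Nat.eq_or_lt_of_le hle with rfl | hlt'
        · rw [hgd]; tauto
        · exact hall i' hlt' hlt
      · intro hall i' hle hlt
        exact hall i' (by omega) hlt
  · rw [innerA, dif_neg h]
    simp only [true_iff]
    intro i' hle hlt
    omega
termination_by codes.length - i

theorem checkB_iff (codes cart : List String) (j : Nat) :
    checkB codes cart j = true ↔ matchAt codes cart j := by
  unfold checkB matchAt
  simp [List.all_eq_true]

-- downScan finds the largest j ≤ t (as an integer) where checkB holds, else goes < 0
theorem downScan_spec (codes cart : List String) (t : Int) :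
    (downScan codes cart t < 0 ∨
      (0 ≤ downScan codes cart t ∧ downScan codes cart t ≤ t ∧
        checkB codes cart (downScan codes cart t).toNat = true)) ∧
    ∀ j : Nat, downScan codes cart t < (j : Int) → (j : Int) ≤ t →
      checkB codes cart j = false := by
  by_cases h : 0 ≤ t
  · by_cases hc : checkB codes cart t.toNat = true
    · rw [downScan, dif_pos h, if_pos hc]
      exact ⟨Or.inr ⟨h, le_refl t, hc⟩, fun j h1 h2 => absurd h1 (by omega)⟩
    · rw [downScan, dif_pos h, if_neg hc]
      obtain ⟨ih1, ih2⟩ := downScan_spec codes cart (t - 1)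
      refine ⟨?_, fun j h1 h2 => ?_⟩
      · rcases ih1 with hh | ⟨a, b, c⟩
        · exact Or.inl hh
        · exact Or.inr ⟨a, by omega, c⟩
      by_cases hj : (j : Int) ≤ t - 1
      · exact ih2 j h1 hj
      · have : j = t.toNat := by omega
        rw [this]
        exact Bool.not_eq_true _ ▸ hc
  · rw [downScan, dif_neg h]
    exact ⟨Or.inl (by omega), fun j h1 h2 => absurd h2 (by omega)⟩
termination_by (t + 1).toNat
decreasing_by omega

-- A's forward greedy loop decides placement of the remaining blocks with lower bound m
theorem loopA_iff (cL : List (List String)) (cart : List String) (n ci m : Nat)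
    (hci : ci ≤ cL.length) (hn : (cL.length - ci) + (cart.length - m) ≤ n) :
    (loopA cL cart ci m = 1 ↔ Place cart (cL.drop ci) m cart.length) ∧
    (loopA cL cart ci m = 0 ∨ loopA cL cart ci m = 1) := by
  induction n generalizing ci m with
  | zero =>
    have hcieq : ci = cL.length := by omega
    rw [loopA, dif_neg (by omega), if_pos hcieq, hcieq, List.drop_length]
    exact ⟨by simp [Place], Or.inr rfl⟩
  | succ n ih =>
    by_cases h1 : ci < cL.length
    · have hd : cL.drop ci = cL[ci] :: cL.drop (ci + 1) := List.drop_eq_getElem_cons h1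
      by_cases h2 : m + (cL[ci]'h1).length ≤ cart.length
      · rw [loopA, dif_pos h1, if_pos h2]
        by_cases hm : innerA (cL[ci]'h1) cart m 0 = true
        · rw [dif_pos hm]
          obtain ⟨ihiff, ihval⟩ := ih (ci + 1) (m + (cL[ci]'h1).length) (by omega) (by omega)
          refine ⟨?_, ihval⟩
          rw [ihiff, hd]
          constructor
          · intro hP
            refine ⟨m, le_refl m, ?_, h2, hP⟩
            intro i hi
            have := (innerA_iff (cL[ci]'h1) cart m 0).mp hm i (by omega) hi
            exact this
          · rintro ⟨j, hj1, _, hj3, hP⟩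
            exact place_mono_lo cart _ _ _ _ hP (by omega)
        · rw [dif_neg hm]
          have hk := innerA_false_lt _ _ _ _ (by simpa using hm)
          obtain ⟨ihiff, ihval⟩ := ih ci (m + 1) hci (by omega)
          refine ⟨?_, ihval⟩
          rw [ihiff, hd]
          constructor
          · rintro ⟨j, hj1, hj2, hj3, hP⟩
            exact ⟨j, by omega, hj2, hj3, hP⟩
          · rintro ⟨j, hj1, hj2, hj3, hP⟩
            rcases Nat.eq_or_lt_of_le hj1 with rfl | hlt
            · exfalso
              apply hm
              rw [innerA_iff]
              intro i' _ hlt'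
              exact hj2 i' hlt'
            · exact ⟨j, by omega, hj2, hj3, hP⟩
      · rw [loopA, dif_pos h1, if_neg h2, if_neg (by omega)]
        refine ⟨⟨fun h => absurd h (by norm_num), fun hP => ?_⟩, Or.inl rfl⟩
        exfalso
        rw [hd] at hP
        obtain ⟨j, hj1, _, hj3, _⟩ := hP
        omega
    · have hcieq : ci = cL.length := by omega
      rw [loopA, dif_neg (by omega), if_pos hcieq, hcieq, List.drop_length]
      exact ⟨by simp [Place], Or.inr rfl⟩

-- B's backward loop decides placement of the reverse of the remaining (reversed) blocks
theorem loopB_iff (cart : List String) (bs : List (List String)) (L : Int)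
    (h0 : 0 ≤ L) (hL : L ≤ (cart.length : Int)) :
    (loopB cart bs L = 1 ↔ Place cart bs.reverse 0 L.toNat) ∧
    (loopB cart bs L = 0 ∨ loopB cart bs L = 1) := by
  induction bs generalizing L with
  | nil => exact ⟨by simp [loopB, Place], Or.inr rfl⟩
  | cons c rs ih =>
    have hds := downScan_spec c cart (L - (c.length : Int))
    simp only [loopB]
    set j := downScan c cart (L - (c.length : Int)) with hj
    by_cases hneg : j < 0
    · rw [if_pos hneg]
      refine ⟨⟨fun h => absurd h (by norm_num), fun hP => ?_⟩, Or.inl rfl⟩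
      exfalso
      rw [show (c :: rs).reverse = rs.reverse ++ [c] by simp, place_snoc] at hP
      obtain ⟨j', _, hm, hend, _⟩ := hP
      have hfalse := hds.2 j' (by omega) (by omega)
      exact absurd ((checkB_iff c cart j').mpr hm) (by simp [hfalse])
    · rw [if_neg hneg]
      rcases hds.1 with h' | ⟨hge, hle, hcb⟩
      · omega
      obtain ⟨ihiff, ihval⟩ := ih j hge (by omega)
      refine ⟨?_, ihval⟩
      rw [ihiff, show (c :: rs).reverse = rs.reverse ++ [c] by simp, place_snoc]
      constructor
      · intro hP
        refine ⟨j.toNat, by omega, (checkB_iff _ _ _).mp hcb, by omega, hP⟩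
      · rintro ⟨j', _, hm, hend, hP⟩
        have hjle : (j' : Int) ≤ j := by
          by_contra hgt
          have hf := hds.2 j' (by omega) (by omega)
          exact absurd ((checkB_iff c cart j').mpr hm) (by simp [hf])
        exact place_mono_hi cart _ _ _ _ hP (by omega)

-- ===== VERDICT (by name: the statement is the Claim_ definition above) =====
theorem checkWinPrize_spec : Claim_equal_checkWinPrize := by
  intro cL cart _
  unfold Spec_checkWinPrize checkWinPrize checkWinPrize_alt
  by_cases h1 : cL = []
  · simp [h1]
  · by_cases h2 : cart = []
    · simp [h1, h2]
    · rw [if_neg h1, if_neg h1, if_neg h2, if_neg h2]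
      obtain ⟨ha, hav⟩ := loopA_iff cL cart (cL.length + cart.length) 0 0 (by omega) (by omega)
      obtain ⟨hb, hbv⟩ := loopB_iff cart cL.reverse (cart.length : Int) (by omega) (le_refl _)
      rw [List.drop_zero] at ha
      rw [List.reverse_reverse, Int.toNat_natCast] at hb
      rcases hav with ha0 | ha1 <;> rcases hbv with hb0 | hb1
      · rw [ha0, hb0]
      · exfalso; rw [ha0] at ha; rw [hb1] at hb; exact absurd (hb.mp rfl) (by
          intro hP; exact absurd (ha.mpr hP) (by norm_num))
      · exfalso; rw [ha1] at ha; rw [hb0] at hb; exact absurd (ha.mp rfl) (by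
          intro hP; exact absurd (hb.mpr hP) (by norm_num))
      · rw [ha1, hb1]
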